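-- pv_equiv track=rewrite | github.com/reyncode/rinkrat | examples/group-parsing.py | parse_conference
-- ===== SOURCE A (Python) =====
-- from typing import List
--
-- def parse_conference(standings: List) -> dict:
--     eastern = []
--     western = []
--
--     for team in standings:
--
--         if team['conferenceName'] == 'Eastern':
--             eastern.append(team)
--
--         elif team['conferenceName'] == 'Western':
--             western.append(team)
--
--     result = dict()
--     result['eastern'] = eastern
--     result['western'] = western
--
--     return result
-- ===== SOURCE B (Python) =====
-- def parse_conference(standings):
--     def of_conf(name):
--         return [team for team in standings if team['conferenceName'] == name]
--     return {'eastern': of_conf('Eastern'), 'western': of_conf('Western')}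
-- ===== Notes on version B (the rewrite author's own statement) =====
-- stated objective: simpler
-- what changed: Replaces A's single-pass two-accumulator partition loop with two independent staged filter passes (one comprehension per conference), removing all mutable accumulator state.
import Mathlib
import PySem

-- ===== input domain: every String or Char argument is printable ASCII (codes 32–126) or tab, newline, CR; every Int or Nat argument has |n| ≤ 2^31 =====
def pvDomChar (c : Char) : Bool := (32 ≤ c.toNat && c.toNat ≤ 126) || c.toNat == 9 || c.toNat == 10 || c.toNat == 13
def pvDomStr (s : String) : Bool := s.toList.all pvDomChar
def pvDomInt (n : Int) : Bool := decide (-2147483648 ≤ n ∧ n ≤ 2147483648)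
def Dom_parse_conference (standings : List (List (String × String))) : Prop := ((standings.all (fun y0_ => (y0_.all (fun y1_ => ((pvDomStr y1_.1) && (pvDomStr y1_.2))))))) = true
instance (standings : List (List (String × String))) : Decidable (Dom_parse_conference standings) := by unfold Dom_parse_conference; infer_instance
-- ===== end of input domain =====

-- B replaces A's single-pass two-accumulator partition loop with two staged filter
-- passes, one per conference (objective: simpler).

-- team['conferenceName'] (first match in the association list; "" only outside Pre_)
def pvConfKey (t : List (String × String)) : String := (t.lookup "conferenceName").getD ""

-- ===== PORT A =====
def parse_conference (standings : List (List (String × String))) : List (String × List (List (String × String))) :=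
  let ew := standings.foldl
    (fun (acc : List (List (String × String)) × List (List (String × String))) team =>
      if pvConfKey team == "Eastern" then (acc.1 ++ [team], acc.2)
      else if pvConfKey team == "Western" then (acc.1, acc.2 ++ [team])
      else acc) ([], [])
  [("eastern", ew.1), ("western", ew.2)]

-- ===== PORT B =====
def pvOfConf (standings : List (List (String × String))) (name : String) : List (List (String × String)) :=
  standings.filter (fun team => pvConfKey team == name)

def parse_conference_alt (standings : List (List (String × String))) : List (String × List (List (String × String))) :=
  [("eastern", pvOfConf standings "Eastern"), ("western", pvOfConf standings "Western")]

-- ===== PRECONDITION & SPEC =====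
-- Pre_ excludes exactly the teams without a 'conferenceName' key, on which A raises KeyError.
def Pre_parse_conference (standings : List (List (String × String))) : Prop :=
  standings.all (fun t => (t.lookup "conferenceName").isSome) = true
instance (standings : List (List (String × String))) : Decidable (Pre_parse_conference standings) := by unfold Pre_parse_conference; infer_instance

def pvWitness_parse_conference : (List (List (String × String))) :=
  [[("conferenceName", "Eastern"), ("teamName", "A")], [("conferenceName", "Western")], [("conferenceName", "Atlantic")]]

def Spec_parse_conference (standings : List (List (String × String))) (out : List (String × List (List (String × String)))) : Prop := out = parse_conference_alt standings
instance (standings : List (List (String × String))) (out : List (String × List (List (String × String)))) : Decidable (Spec_parse_conference standings out) := by unfold Spec_parse_conference; infer_instance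

-- ===== CLAIM (what is proved, stated in full; the proofs are below) =====
def Claim_equal_parse_conference : Prop := ∀ (standings : List (List (String × String))), Dom_parse_conference standings → Pre_parse_conference standings → Spec_parse_conference standings (parse_conference standings)

-- ===== LEMMAS AND PROOFS =====

-- A's partition loop appends the "Eastern"/"Western" filters to its accumulators.
theorem pv_foldA (l : List (List (String × String)))
    (e w : List (List (String × String))) :
    l.foldl
      (fun (acc : List (List (String × String)) × List (List (String × String))) team =>
        if pvConfKey team == "Eastern" then (acc.1 ++ [team], acc.2)
        else if pvConfKey team == "Western" then (acc.1, acc.2 ++ [team])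
        else acc) (e, w)
    = (e ++ l.filter (fun t => pvConfKey t == "Eastern"),
       w ++ l.filter (fun t => pvConfKey t == "Western")) := by
  induction l generalizing e w with
  | nil => simp
  | cons t l ih =>
    rw [List.foldl_cons]
    by_cases hE : pvConfKey t == "Eastern"
    · have hW : (pvConfKey t == "Western") = false := by
        have h : pvConfKey t = "Eastern" := by simpa using hE
        simp [h]
      have h1 : (if pvConfKey t == "Eastern" then (e ++ [t], w)
          else if pvConfKey t == "Western" then (e, w ++ [t]) else (e, w)) = (e ++ [t], w) := by
        rw [if_pos hE]
      rw [h1, ih]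
      simp [hE, hW]
    · by_cases hW : pvConfKey t == "Western"
      · have h1 : (if pvConfKey t == "Eastern" then (e ++ [t], w)
            else if pvConfKey t == "Western" then (e, w ++ [t]) else (e, w)) = (e, w ++ [t]) := by
          rw [if_neg hE, if_pos hW]
        rw [h1, ih]
        simp [hE, hW]
      · have h1 : (if pvConfKey t == "Eastern" then (e ++ [t], w)
            else if pvConfKey t == "Western" then (e, w ++ [t]) else (e, w)) = (e, w) := by
          rw [if_neg hE, if_neg hW]
        rw [h1, ih]
        simp [hE, hW]

theorem parse_conference_eq (standings : List (List (String × String))) :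
    parse_conference standings = parse_conference_alt standings := by
  simp only [parse_conference, parse_conference_alt, pvOfConf, pv_foldA]
  simp

-- ===== VERDICT (by name: the statement is the Claim_ definition above) =====
theorem parse_conference_spec : Claim_equal_parse_conference := by
  intro standings _ _
  exact parse_conference_eq standings
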